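-- pv_equiv track=rewrite | github.com/ChangxingJiang/OJ-Practice | Question/1520/1520_Python_2.py | maxNumOfSubstrings
-- ===== SOURCE A (Python) =====
-- from typing import List
--
-- def maxNumOfSubstrings(s: str) -> List[str]:
--     # 计算所有字母的第一个位置和最后一个位置
--     # O(S)
--     positions = [[-1, -1]] * 26
--     for i, ch in enumerate(s):
--         idx1 = ord(ch) - 97
--         if positions[idx1] == [-1, -1]:
--             positions[idx1] = [i, i]
--         else:
--             positions[idx1][1] = i
--
--     # 26次遍历调整所有字母的左右范围
--     # O(26×26×S) = O(S)
--     for idx1 in range(26):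
--         if positions[idx1] != [-1, -1]:
--             j = positions[idx1][0]
--             while j <= positions[idx1][1]:
--                 idx2 = ord(s[j]) - 97
--                 if positions[idx1][0] <= positions[idx2][0] and positions[idx2][1] <= positions[idx1][1]:
--                     pass
--                 else:
--                     positions[idx1][0] = min(positions[idx1][0], positions[idx2][0])
--                     positions[idx1][1] = max(positions[idx1][1], positions[idx2][1])
--                     j = positions[idx1][0]
--                 j += 1
--
--     # 过滤不存在的范围和重复的范围
--     # O(26) = O(1)
--     positions = [tuple(position) for position in positions if position != [-1, -1]]
--
--     # 排序所有的范围
--     # O(26log26) = O(1)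
--     positions = list(sorted(set(positions), key=lambda x: (x[1], x[0])))
--
--     # 贪心选择字符串，得到结果
--     # O(26) = O(1)
--     ans = []
--     end = -1
--     for left, right in positions:
--         if end == -1 or left > end:
--             end = right
--             ans.append(s[left:right + 1])
--     return ans
-- ===== SOURCE B (Python) =====
-- from typing import List
--
-- def maxNumOfSubstrings(s: str) -> List[str]:
--     n = len(s)
--     # first/last occurrence per letter slot, two separate passes
--     first = [-1] * 26
--     last = [-1] * 26
--     for i in range(n - 1, -1, -1):
--         first[ord(s[i]) - 97] = i
--     for i in range(n):
--         last[ord(s[i]) - 97] = i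
--     # per present letter, grow its interval to a fixed point by whole-window rescans
--     intervals = []
--     for c in range(26):
--         if first[c] == -1:
--             continue
--         l, r = first[c], last[c]
--         while True:
--             nl = min(first[ord(s[j]) - 97] for j in range(l, r + 1))
--             nr = max(last[ord(s[j]) - 97] for j in range(l, r + 1))
--             if nl == l and nr == r:
--                 break
--             l, r = nl, nr
--         if (l, r) not in intervals:
--             intervals.append((l, r))
--     intervals.sort(key=lambda p: (p[1], p[0]))
--     # greedy selection of disjoint intervals, earliest right end first
--     ans = []
--     end = -1
--     for l, r in intervals:
--         if l > end:
--             end = r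
--             ans.append(s[l:r + 1])
--     return ans
-- ===== Notes on version B (the rewrite author's own statement) =====
-- stated objective: alternative
-- what changed: A builds first/last in one aliased-list pass and closes each letter's interval with an in-place merge loop that restarts its scan pointer after every merge; B builds the first/last tables in two separate passes and closes each interval by a fixed-point iteration that recomputes the window's min-first/max-last over the whole window per round, then dedupes with an explicit membership list before the same sort-and-greedy tail.
import Mathlib
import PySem

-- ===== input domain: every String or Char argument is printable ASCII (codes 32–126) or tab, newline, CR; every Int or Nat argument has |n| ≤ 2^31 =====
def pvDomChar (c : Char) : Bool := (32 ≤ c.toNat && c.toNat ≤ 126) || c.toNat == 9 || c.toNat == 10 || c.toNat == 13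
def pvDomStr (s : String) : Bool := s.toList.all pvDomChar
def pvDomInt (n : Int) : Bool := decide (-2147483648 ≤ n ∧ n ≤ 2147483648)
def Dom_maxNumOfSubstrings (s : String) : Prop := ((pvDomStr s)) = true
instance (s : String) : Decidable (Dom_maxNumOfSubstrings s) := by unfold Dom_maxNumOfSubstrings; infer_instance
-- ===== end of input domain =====

-- B replaces A's in-place merge-with-restart scan by two occurrence passes, a per-letter
-- fixed-point window expansion and an explicit dedupe; same results, similar cost (objective: alternative).

-- ===== PORT A =====
-- A's inner `while j <= positions[idx1][1]` loop; the fuel A's callers pass is proved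
-- sufficient below (the loop always terminates before it runs out).
def pvLoopA (cs : List Char) (fuel : Nat) (ps : List (Int × Int)) (idx1 : Int) (j : Int) :
    List (Int × Int) :=
  match fuel with
  | 0 => ps
  | fuel + 1 =>
    let p := PySem.List.pyGetD ps idx1 ((-1 : Int), (-1 : Int))
    if j ≤ p.2 then
      let idx2 : Int := (((PySem.List.pyGet? cs j).getD ' ').toNat : Int) - 97
      let q := PySem.List.pyGetD ps idx2 ((-1 : Int), (-1 : Int))
      if p.1 ≤ q.1 ∧ q.2 ≤ p.2 then
        pvLoopA cs fuel ps idx1 (j + 1)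
      else
        pvLoopA cs fuel (PySem.List.pySetD ps idx1 (min p.1 q.1, max p.2 q.2)) idx1
          (min p.1 q.1 + 1)
    else ps

-- A's first pass: positions[idx1] = [i, i] on first sight, else positions[idx1][1] = i
def pvA_phase1 (cs : List Char) : List (Int × Int) :=
  (PySem.List.enumerate cs).foldl
    (fun ps ic =>
      let idx1 : Int := (ic.2.toNat : Int) - 97
      if PySem.List.pyGetD ps idx1 ((-1 : Int), (-1 : Int)) = ((-1 : Int), (-1 : Int)) then
        PySem.List.pySetD ps idx1 (ic.1, ic.1)
      else
        PySem.List.pySetD ps idx1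
          ((PySem.List.pyGetD ps idx1 ((-1 : Int), (-1 : Int))).1, ic.1))
    (PySem.List.pyRepeat [((-1 : Int), (-1 : Int))] 26)

-- A's second pass: `for idx1 in range(26): if positions[idx1] != [-1,-1]: <while loop>`
def pvA_phase2 (cs : List Char) (ps1 : List (Int × Int)) : List (Int × Int) :=
  (PySem.List.pyRange 0 26).foldl
    (fun ps idx1 =>
      if PySem.List.pyGetD ps idx1 ((-1 : Int), (-1 : Int)) ≠ ((-1 : Int), (-1 : Int)) then
        pvLoopA cs ((cs.length + 2) * (cs.length + 2)) ps idx1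
          (PySem.List.pyGetD ps idx1 ((-1 : Int), (-1 : Int))).1
      else ps)
    ps1

def maxNumOfSubstrings (s : String) : List String :=
  let cs := s.toList
  let ps2 := pvA_phase2 cs (pvA_phase1 cs)
  let ps3 := ps2.filter (fun p => p ≠ ((-1 : Int), (-1 : Int)))
  let ps4 := PySem.List.sorted2 (PySem.Set.ofList ps3) (fun p => p.2) (fun p => p.1)
  (ps4.foldl
    (fun (st : List String × Int) p =>
      if st.2 = -1 ∨ st.2 < p.1 then
        (st.1 ++ [String.ofList (PySem.List.slice cs (some p.1) (some (p.2 + 1)))], p.2)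
      else st)
    ([], -1)).1

-- ===== PORT B =====
-- B's `while True:` fixed-point expansion of one window (fuel len(s)+2 always suffices)
def pvExtendB (cs : List Char) (first last : List Int) (fuel : Nat) (l r : Int) : Int × Int :=
  match fuel with
  | 0 => (l, r)
  | fuel + 1 =>
    let win := PySem.List.pyRange l (r + 1)
    let nl := (PySem.List.min?
      (win.map (fun j =>
        PySem.List.pyGetD first ((((PySem.List.pyGet? cs j).getD ' ').toNat : Int) - 97) (-1)))
      (fun x => x)).getD l
    let nr := (PySem.List.max?
      (win.map (fun j =>
        PySem.List.pyGetD last ((((PySem.List.pyGet? cs j).getD ' ').toNat : Int) - 97) (-1)))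
      (fun x => x)).getD r
    if nl = l ∧ nr = r then (l, r) else pvExtendB cs first last fuel nl nr

-- backward pass: `for i in range(n-1, -1, -1): first[ord(s[i]) - 97] = i`
def pvB_first (cs : List Char) : List Int :=
  (PySem.List.pyRange ((cs.length : Int) - 1) (-1) (-1)).foldl
    (fun f i =>
      PySem.List.pySetD f ((((PySem.List.pyGet? cs i).getD ' ').toNat : Int) - 97) i)
    (PySem.List.pyRepeat [(-1 : Int)] 26)

-- forward pass: `for i in range(n): last[ord(s[i]) - 97] = i`
def pvB_last (cs : List Char) : List Int :=
  (PySem.List.pyRange 0 (cs.length : Int)).foldl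
    (fun f i =>
      PySem.List.pySetD f ((((PySem.List.pyGet? cs i).getD ' ').toNat : Int) - 97) i)
    (PySem.List.pyRepeat [(-1 : Int)] 26)

-- `for c in range(26): ... if (l, r) not in intervals: intervals.append((l, r))`
def pvB_intervals (cs : List Char) (first last : List Int) : List (Int × Int) :=
  (PySem.List.pyRange 0 26).foldl
    (fun acc c =>
      if PySem.List.pyGetD first c (-1) = -1 then acc
      else
        let p := pvExtendB cs first last (cs.length + 2)
          (PySem.List.pyGetD first c (-1)) (PySem.List.pyGetD last c (-1))
        if p ∈ acc then acc else acc ++ [p])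
    []

def maxNumOfSubstrings_alt (s : String) : List String :=
  let cs := s.toList
  let iv := PySem.List.sorted2 (pvB_intervals cs (pvB_first cs) (pvB_last cs))
    (fun p => p.2) (fun p => p.1)
  (iv.foldl
    (fun (st : List String × Int) p =>
      if st.2 < p.1 then
        (st.1 ++ [String.ofList (PySem.List.slice cs (some p.1) (some (p.2 + 1)))], p.2)
      else st)
    ([], -1)).1

-- ===== PRECONDITION & SPEC =====
-- Pre_ = exactly the inputs on which A returns: on any character with code outside
-- [71, 122] ('G'..'z'), `positions[ord(ch) - 97]` is an out-of-range index into the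
-- 26-entry list and A raises IndexError (codes 71..96 reach a cell via Python's
-- negative indexing, so A returns there, and B does the same).
def Pre_maxNumOfSubstrings (s : String) : Prop :=
  s.toList.all (fun c => 71 ≤ c.toNat && c.toNat ≤ 122) = true
instance (s : String) : Decidable (Pre_maxNumOfSubstrings s) := by
  unfold Pre_maxNumOfSubstrings; infer_instance

def pvWitness_maxNumOfSubstrings : String := "a"

def Spec_maxNumOfSubstrings (s : String) (out : List String) : Prop :=
  out = maxNumOfSubstrings_alt s
instance (s : String) (out : List String) : Decidable (Spec_maxNumOfSubstrings s out) := by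
  unfold Spec_maxNumOfSubstrings; infer_instance

-- ===== CLAIM (what is proved, stated in full; the proofs are below) =====
def Claim_equal_maxNumOfSubstrings : Prop :=
  ∀ (s : String), Dom_maxNumOfSubstrings s → Pre_maxNumOfSubstrings s →
    Spec_maxNumOfSubstrings s (maxNumOfSubstrings s)

-- ===== LEMMAS AND PROOFS =====

theorem pvPre_iff (s : String) :
    Pre_maxNumOfSubstrings s ↔ ∀ c ∈ s.toList, 71 ≤ c.toNat ∧ c.toNat ≤ 122 := by
  unfold Pre_maxNumOfSubstrings
  simp [List.all_eq_true]
def pvCell (c : Char) : Nat := (((c.toNat : Int) - 97) % 26).toNat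

theorem pvCell_lt (c : Char) : pvCell c < 26 := by
  unfold pvCell
  have h1 := Int.emod_nonneg ((c.toNat : Int) - 97) (by norm_num : (26:Int) ≠ 0)
  have h2 := Int.emod_lt_of_pos ((c.toNat : Int) - 97) (by norm_num : (0:Int) < 26)
  omega

theorem pvIdx_eq (n : Nat) (i : Int) (h0 : -26 ≤ i) (h1 : i < 26) (hn : n = 26) :
    PySem.List.pyIdx? n i = some ((i % 26).toNat) := by
  unfold PySem.List.pyIdx?
  subst hn
  split_ifs with ha hb hc
  · congr 1
    have : i % 26 = i := Int.emod_eq_of_lt ha hb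
    omega
  · omega
  · congr 1
    have h26 : (i + 26) % 26 = i % 26 := by
      have := Int.add_mul_emod_self_left (a := i) (b := 26) (c := 1)
      simpa using this
    have : (i + 26) % 26 = i + 26 := Int.emod_eq_of_lt (by omega) (by omega)
    omega
  · omega

theorem pvGetD_cell {α : Type} (xs : List α) (d : α) (c : Char)
    (hlen : xs.length = 26) (h1 : 71 ≤ c.toNat) (h2 : c.toNat ≤ 122) :
    PySem.List.pyGetD xs ((c.toNat : Int) - 97) d = xs.getD (pvCell c) d := by
  have h1' : (71 : Int) ≤ (c.toNat : Int) := by exact_mod_cast h1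
  have h2' : (c.toNat : Int) ≤ 122 := by exact_mod_cast h2
  rw [PySem.List.pyGetD, PySem.List.pyGet?, hlen,
    pvIdx_eq 26 _ (by omega) (by omega) rfl]
  simp [pvCell, List.getD_eq_getElem?_getD]

theorem pvSetD_cell {α : Type} (xs : List α) (v : α) (c : Char)
    (hlen : xs.length = 26) (h1 : 71 ≤ c.toNat) (h2 : c.toNat ≤ 122) :
    PySem.List.pySetD xs ((c.toNat : Int) - 97) v = xs.set (pvCell c) v := by
  have h1' : (71 : Int) ≤ (c.toNat : Int) := by exact_mod_cast h1
  have h2' : (c.toNat : Int) ≤ 122 := by exact_mod_cast h2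
  rw [PySem.List.pySetD, PySem.List.pySet?, hlen,
    pvIdx_eq 26 _ (by omega) (by omega) rfl]
  simp [pvCell]

def pvAt (cs : List Char) (j : Int) : Char := cs.getD j.toNat ' '

def pvOcc (cs : List Char) (m : Nat) : List Nat :=
  (List.range cs.length).filter (fun j => pvCell (cs.getD j ' ') == m)

def pvFirst (cs : List Char) (m : Nat) : Int :=
  match pvOcc cs m with
  | [] => -1
  | j :: _ => (j : Int)

def pvLast (cs : List Char) (m : Nat) : Int :=
  match (pvOcc cs m).getLast? with
  | none => -1
  | some j => (j : Int)

theorem pvAt_get (cs : List Char) (j : Int) (h0 : 0 ≤ j) :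
    (PySem.List.pyGet? cs j).getD ' ' = pvAt cs j := by
  rw [PySem.List.pyGet?_of_nonneg cs h0, pvAt, List.getD_eq_getElem?_getD]

theorem pvAt_mem (cs : List Char) (j : Int) (h0 : 0 ≤ j) (h1 : j < cs.length) :
    pvAt cs j ∈ cs := by
  have hj : j.toNat < cs.length := by omega
  rw [pvAt, List.getD_eq_getElem?_getD, List.getElem?_eq_getElem hj]
  exact List.getElem_mem _

theorem pvOcc_mem {cs : List Char} {m : Nat} {j : Nat} :
    j ∈ pvOcc cs m ↔ j < cs.length ∧ pvCell (cs.getD j ' ') = m := by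
  simp [pvOcc, List.mem_filter]

theorem pvOcc_sorted (cs : List Char) (m : Nat) : (pvOcc cs m).Pairwise (· < ·) := by
  exact List.Pairwise.filter _ (List.pairwise_lt_range)

theorem pvFirst_neg {cs : List Char} {m : Nat} : pvFirst cs m = -1 ↔ pvOcc cs m = [] := by
  unfold pvFirst
  cases h : pvOcc cs m with
  | nil => simp
  | cons a t => simp

theorem pvLast_neg {cs : List Char} {m : Nat} : pvLast cs m = -1 ↔ pvOcc cs m = [] := by
  unfold pvLast
  cases h : (pvOcc cs m).getLast? with
  | none => simp [List.getLast?_eq_none_iff.mp h]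
  | some a =>
    have : pvOcc cs m ≠ [] := by
      intro he; rw [he] at h; simp at h
    simp [this]

theorem pvFirst_spec {cs : List Char} {m : Nat} (h : pvOcc cs m ≠ []) :
    ∃ jf : Nat, pvFirst cs m = (jf : Int) ∧ jf ∈ pvOcc cs m ∧ ∀ k ∈ pvOcc cs m, jf ≤ k := by
  unfold pvFirst
  cases hocc : pvOcc cs m with
  | nil => exact absurd hocc h
  | cons a t =>
    refine ⟨a, rfl, by simp, ?_⟩
    intro k hk
    have hp := pvOcc_sorted cs m
    rw [hocc] at hp
    rcases List.mem_cons.mp hk with rfl | hk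
    · exact le_refl k
    · exact le_of_lt ((List.pairwise_cons.mp hp).1 k hk)

theorem pvLast_spec {cs : List Char} {m : Nat} (h : pvOcc cs m ≠ []) :
    ∃ jl : Nat, pvLast cs m = (jl : Int) ∧ jl ∈ pvOcc cs m ∧ ∀ k ∈ pvOcc cs m, k ≤ jl := by
  unfold pvLast
  cases hocc : (pvOcc cs m).getLast? with
  | none => exact absurd (List.getLast?_eq_none_iff.mp hocc) h
  | some a =>
    refine ⟨a, rfl, List.mem_of_getLast? hocc, ?_⟩
    intro k hk
    -- in a (·<·)-pairwise list, every element ≤ getLast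
    have hp := pvOcc_sorted cs m
    obtain ⟨pre, hpre⟩ := List.getLast?_eq_some_iff.mp hocc
    rw [hpre] at hk hp
    rcases List.mem_append.mp hk with hk | hk
    · have := List.pairwise_append.mp hp
      exact le_of_lt (this.2.2 k hk a (by simp))
    · simp at hk; omega

theorem pvFirst_nonneg {cs : List Char} {m : Nat} (h : pvOcc cs m ≠ []) : 0 ≤ pvFirst cs m := by
  obtain ⟨jf, e, _, _⟩ := pvFirst_spec h; omega

theorem pvFirst_le_pvLast {cs : List Char} {m : Nat} (h : pvOcc cs m ≠ []) :
    pvFirst cs m ≤ pvLast cs m := by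
  obtain ⟨jf, e1, hm1, _⟩ := pvFirst_spec h
  obtain ⟨jl, e2, _, hmax⟩ := pvLast_spec h
  have := hmax jf hm1; omega

theorem pvLast_lt {cs : List Char} {m : Nat} (h : pvOcc cs m ≠ []) :
    pvLast cs m < cs.length := by
  obtain ⟨jl, e2, hm, _⟩ := pvLast_spec h
  have := (pvOcc_mem.mp hm).1; omega

theorem pvFirst_lt {cs : List Char} {m : Nat} (h : pvOcc cs m ≠ []) :
    pvFirst cs m < cs.length := by
  have := pvFirst_le_pvLast h; have := pvLast_lt h; omega

theorem pvAt_between (cs : List Char) (j : Int) (h0 : 0 ≤ j) (h1 : j < cs.length) :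
    pvFirst cs (pvCell (pvAt cs j)) ≤ j ∧ j ≤ pvLast cs (pvCell (pvAt cs j)) ∧
      pvOcc cs (pvCell (pvAt cs j)) ≠ [] := by
  have hmem : j.toNat ∈ pvOcc cs (pvCell (pvAt cs j)) := by
    rw [pvOcc_mem]
    constructor
    · omega
    · rfl
  have hne : pvOcc cs (pvCell (pvAt cs j)) ≠ [] := by
    intro he; rw [he] at hmem; simp at hmem
  obtain ⟨jf, e1, _, hmin⟩ := pvFirst_spec hne
  obtain ⟨jl, e2, _, hmax⟩ := pvLast_spec hne
  have := hmin _ hmem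
  have := hmax _ hmem
  refine ⟨by omega, by omega, hne⟩

-- cs[first] has cell m / cs[last] has cell m

theorem pvAt_first {cs : List Char} {m : Nat} (h : pvOcc cs m ≠ []) :
    pvCell (pvAt cs (pvFirst cs m)) = m := by
  obtain ⟨jf, e1, hm, _⟩ := pvFirst_spec h
  have := pvOcc_mem.mp hm
  rw [e1]; simpa [pvAt] using this.2

def pvClosed (cs : List Char) (l r : Int) : Prop :=
  ∀ j : Int, l ≤ j → j ≤ r →
    l ≤ pvFirst cs (pvCell (pvAt cs j)) ∧ pvLast cs (pvCell (pvAt cs j)) ≤ r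

theorem pvClosed_all (cs : List Char) : pvClosed cs 0 ((cs.length : Int) - 1) := by
  intro j hj1 hj2
  obtain ⟨a, b, hne⟩ := pvAt_between cs j hj1 (by omega)
  have := pvFirst_nonneg hne
  have := pvLast_lt hne
  omega

theorem pvOcc_snoc (cs : List Char) (c : Char) (m : Nat) :
    pvOcc (cs ++ [c]) m = pvOcc cs m ++ if pvCell c = m then [cs.length] else [] := by
  unfold pvOcc
  rw [List.length_append, List.length_singleton, List.range_succ, List.filter_append]
  congr 1
  · apply List.filter_congr
    intro j hj
    have hj' : j < cs.length := List.mem_range.mp hj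
    congr 2
    rw [List.getD_eq_getElem?_getD, List.getD_eq_getElem?_getD,
      List.getElem?_append_left hj']
  · have : (cs ++ [c]).getD cs.length ' ' = c := by
      rw [List.getD_eq_getElem?_getD, List.getElem?_append_right (le_refl _)]
      simp
    simp [this]
    split_ifs <;> simp_all

theorem pvFirst_snoc (cs : List Char) (c : Char) (m : Nat) :
    pvFirst (cs ++ [c]) m =
      if pvOcc cs m = [] then (if pvCell c = m then (cs.length : Int) else -1)
      else pvFirst cs m := by
  unfold pvFirst
  rw [pvOcc_snoc]
  cases hocc : pvOcc cs m with
  | nil => simp; split_ifs <;> simp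
  | cons a t => simp

theorem pvLast_snoc (cs : List Char) (c : Char) (m : Nat) :
    pvLast (cs ++ [c]) m =
      if pvCell c = m then (cs.length : Int) else pvLast cs m := by
  unfold pvLast
  rw [pvOcc_snoc]
  split_ifs with hc
  · simp
  · simp

theorem pvMapRange_getD {α : Type} (f : Nat → α) (m : Nat) (hm : m < 26) (d : α) :
    ((List.range 26).map f).getD m d = f m := by
  rw [List.getD_eq_getElem?_getD, List.getElem?_map]
  simp [List.getElem?_range hm]

theorem pvMapRange_set {α : Type} (f : Nat → α) (m : Nat) (hm : m < 26) (v : α) :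
    ((List.range 26).map f).set m v = (List.range 26).map (fun k => if k = m then v else f k) := by
  apply List.ext_getElem
  · simp
  · intro i h1 h2
    simp only [List.getElem_set, List.getElem_map, List.getElem_range]
    simp at h1
    by_cases hi : i = m
    · simp [hi]
    · simp [hi]
      exact fun hx => absurd hx.symm hi

theorem pvA_phase1_eq (cs : List Char) (h : ∀ c ∈ cs, 71 ≤ c.toNat ∧ c.toNat ≤ 122) :
    pvA_phase1 cs = (List.range 26).map (fun m => (pvFirst cs m, pvLast cs m)) := by
  unfold pvA_phase1
  induction cs using List.reverseRecOn with
  | nil =>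
    rw [show PySem.List.pyRepeat [((-1 : Int), (-1 : Int))] 26 = List.replicate 26 (-1,-1) from
      PySem.List.pyRepeat_singleton _ _]
    simp [PySem.List.enumerate]
    apply List.ext_getElem
    · simp
    · intro i h1 h2
      simp [pvFirst, pvLast, pvOcc]
  | append_singleton cs c ih =>
    have hc := h c (by simp)
    have hcs : ∀ c ∈ cs, 71 ≤ c.toNat ∧ c.toNat ≤ 122 := fun x hx => h x (by simp [hx])
    rw [PySem.List.enumerate_append, List.foldl_append, ih hcs]
    have hcell := pvCell_lt c
    simp only [PySem.List.enumerate_cons, PySem.List.enumerate_nil, List.foldl_cons,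
      List.foldl_nil]
    rw [pvGetD_cell _ _ c (by simp) hc.1 hc.2]
    rw [pvMapRange_getD _ _ hcell]
    by_cases he : pvOcc cs (pvCell c) = []
    · have h1 : pvFirst cs (pvCell c) = -1 := pvFirst_neg.mpr he
      have h2 : pvLast cs (pvCell c) = -1 := pvLast_neg.mpr he
      rw [if_pos (by rw [h1, h2])]
      rw [pvSetD_cell _ _ c (by simp) hc.1 hc.2, pvMapRange_set _ _ hcell]
      apply List.ext_getElem
      · simp
      · intro i hh1 hh2
        simp only [List.getElem_map, List.getElem_range]
        have hi : i < 26 := by simpa using hh1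
        rw [pvFirst_snoc, pvLast_snoc]
        by_cases hic : i = pvCell c
        · subst hic
          simp [he, PySem.List.enumerate]
        · have : pvCell c ≠ i := fun hx => hic hx.symm
          have hocc_ne : pvOcc cs i = [] → pvFirst cs i = -1 := fun hx => pvFirst_neg.mpr hx
          simp [hic, this]
          intro hx
          simp [pvFirst_neg.mpr hx, pvLast_neg.mpr hx]
    · have h0 : 0 ≤ pvFirst cs (pvCell c) := pvFirst_nonneg he
      rw [if_neg (by intro hx; rw [Prod.ext_iff] at hx; omega)]
      rw [pvSetD_cell _ _ c (by simp) hc.1 hc.2, pvMapRange_set _ _ hcell]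
      apply List.ext_getElem
      · simp
      · intro i hh1 hh2
        simp only [List.getElem_map, List.getElem_range]
        have hi : i < 26 := by simpa using hh1
        rw [pvFirst_snoc, pvLast_snoc]
        by_cases hic : i = pvCell c
        · subst hic
          simp [he, PySem.List.enumerate]
        · have : pvCell c ≠ i := fun hx => hic hx.symm
          simp [hic, this]
          intro hx
          simp [pvFirst_neg.mpr hx, pvLast_neg.mpr hx]

theorem pvFirst_nonneg_iff {cs : List Char} {m : Nat} :
    0 ≤ pvFirst cs m ↔ pvOcc cs m ≠ [] := by
  constructor
  · intro h0 he
    rw [pvFirst_neg.mpr he] at h0; omega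
  · exact pvFirst_nonneg

theorem pvLast_nonneg_iff {cs : List Char} {m : Nat} :
    0 ≤ pvLast cs m ↔ pvOcc cs m ≠ [] := by
  constructor
  · intro h0 he
    rw [pvLast_neg.mpr he] at h0; omega
  · intro h
    have := pvFirst_le_pvLast h; have := pvFirst_nonneg h; omega

theorem pvFirst_le_of_mem {cs : List Char} {m : Nat} {k : Nat} (hk : k ∈ pvOcc cs m) :
    pvFirst cs m ≤ (k : Int) := by
  have hne : pvOcc cs m ≠ [] := fun he => by rw [he] at hk; simp at hk
  obtain ⟨jf, e, _, hmin⟩ := pvFirst_spec hne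
  have := hmin k hk; omega


theorem pvFirst_eq_cell {cs : List Char} {m : Nat} {k : Nat} (hk : k < cs.length)
    (he : pvFirst cs m = (k : Int)) : pvCell (cs.getD k ' ') = m := by
  have hne : pvOcc cs m ≠ [] := by
    intro h; rw [pvFirst_neg.mpr h] at he; omega
  obtain ⟨jf, e, hm, _⟩ := pvFirst_spec hne
  have hjk : jf = k := by omega
  subst hjk
  exact (pvOcc_mem.mp hm).2

-- B's backward first-position pass, processed prefix [0, k)

theorem pvB_first_go (cs : List Char) (h : ∀ c ∈ cs, 71 ≤ c.toNat ∧ c.toNat ≤ 122) :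
    ∀ (k : Nat), k ≤ cs.length → ∀ (f0 : List Int), f0.length = 26 →
    ((PySem.List.pyRange ((k : Int) - 1) (-1) (-1)).foldl
      (fun f i =>
        PySem.List.pySetD f ((((PySem.List.pyGet? cs i).getD ' ').toNat : Int) - 97) i)
      f0).length = 26 ∧
    ∀ m < 26,
      ((PySem.List.pyRange ((k : Int) - 1) (-1) (-1)).foldl
        (fun f i =>
          PySem.List.pySetD f ((((PySem.List.pyGet? cs i).getD ' ').toNat : Int) - 97) i)
        f0).getD m 0 =
      if 0 ≤ pvFirst cs m ∧ pvFirst cs m < (k : Int) then pvFirst cs m else f0.getD m 0 := by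
  intro k
  induction k with
  | zero =>
    intro _ f0 hf0
    rw [show ((0 : Nat) : Int) - 1 = -1 by norm_num, PySem.List.pyRange_neg_one_eq_nil (by omega)]
    simp only [List.foldl_nil]
    exact ⟨hf0, fun m hm => by rw [if_neg (by omega)]⟩
  | succ k ih =>
    intro hk f0 hf0
    have hkn : k < cs.length := by omega
    rw [show ((k + 1 : Nat) : Int) - 1 = (k : Int) by push_cast; ring,
      PySem.List.pyRange_neg_one_cons (by omega), List.foldl_cons]
    have hchar := h _ (pvAt_mem cs (k : Int) (by omega) (by exact_mod_cast hkn))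
    rw [pvAt_get cs (k : Int) (by omega), pvSetD_cell f0 _ _ hf0 hchar.1 hchar.2]
    have hlen' : (f0.set (pvCell (pvAt cs (k : Int))) (k : Int)).length = 26 := by
      simp [hf0]
    have hk1 : (k : Int) - 1 = ((k : Int) - 1) := rfl
    -- rewrite start index: pyRange (k - 1) with (↑k - 1 : Int)
    obtain ⟨hl, hent⟩ := ih (by omega) _ hlen'
    refine ⟨hl, fun m hm => ?_⟩
    rw [hent m hm]
    have hATcell : pvAt cs (k : Int) = cs.getD k ' ' := by simp [pvAt]
    rw [hATcell]
    set ch := cs.getD k ' ' with hch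
    have hmemk : k ∈ pvOcc cs (pvCell ch) := pvOcc_mem.mpr ⟨hkn, rfl⟩
    have hsetD : ∀ v : Int, (f0.set (pvCell ch) v).getD m 0 =
        if m = pvCell ch then v else f0.getD m 0 := by
      intro v
      rw [List.getD_eq_getElem?_getD, List.getElem?_set, List.getD_eq_getElem?_getD]
      by_cases hmm : pvCell ch = m
      · simp [hmm, hf0, show m < 26 from hm]
      · simp [hmm]
        exact fun hx => absurd hx.symm hmm
    by_cases hcase : 0 ≤ pvFirst cs m ∧ pvFirst cs m < (k : Int)
    · rw [if_pos hcase, if_pos ⟨hcase.1, by omega⟩]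
    · rw [if_neg hcase, hsetD]
      by_cases hmc : m = pvCell ch
      · subst hmc
        have h1 : pvFirst cs (pvCell ch) ≤ (k : Int) := pvFirst_le_of_mem hmemk
        have h0 : 0 ≤ pvFirst cs (pvCell ch) := pvFirst_nonneg_iff.mpr
          (fun he => by rw [he] at hmemk; simp at hmemk)
        have he : pvFirst cs (pvCell ch) = (k : Int) := by omega
        rw [if_pos rfl, he, if_pos (show (0:Int) ≤ (k:Int) ∧ (k:Int) < ((k+1:Nat):Int) by omega)]
      · have hne : pvFirst cs m ≠ (k : Int) := by
          intro he
          exact hmc (pvFirst_eq_cell hkn he).symm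
        rw [if_neg hmc, if_neg (by omega)]

theorem pvRepeat26 {α : Type} (a : α) :
    PySem.List.pyRepeat [a] 26 = List.replicate 26 a := by
  rw [PySem.List.pyRepeat_singleton]
  rfl

theorem pvB_first_eq (cs : List Char) (h : ∀ c ∈ cs, 71 ≤ c.toNat ∧ c.toNat ≤ 122) :
    pvB_first cs = (List.range 26).map (fun m => pvFirst cs m) := by
  unfold pvB_first
  rw [pvRepeat26]
  obtain ⟨hl, hent⟩ := pvB_first_go cs h cs.length (le_refl _) (List.replicate 26 (-1)) (by simp)
  apply List.ext_getElem
  · rw [hl]; simp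
  · intro i h1 h2
    have hi : i < 26 := by rw [hl] at h1; exact h1
    have e1 := hent i hi
    rw [List.getD_eq_getElem?_getD, List.getElem?_eq_getElem h1] at e1
    simp only [Option.getD_some] at e1
    rw [e1]
    simp only [List.getElem_map, List.getElem_range]
    have hrepl : (List.replicate 26 (-1:Int)).getD i 0 = -1 := by
      rw [List.getD_eq_getElem?_getD, List.getElem?_replicate]
      simp [hi]
    split_ifs with hc
    · rfl
    · rw [hrepl]
      by_cases hocc : pvOcc cs i = []
      · rw [pvFirst_neg.mpr hocc]
      · exact absurd ⟨pvFirst_nonneg hocc, pvFirst_lt hocc⟩ hc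

theorem pvB_last_go (cs : List Char) (h : ∀ c ∈ cs, 71 ≤ c.toNat ∧ c.toNat ≤ 122) :
    ∀ (k : Nat), k ≤ cs.length → ∀ (f0 : List Int), f0.length = 26 →
    ((PySem.List.pyRange 0 (k : Int)).foldl
      (fun f i =>
        PySem.List.pySetD f ((((PySem.List.pyGet? cs i).getD ' ').toNat : Int) - 97) i)
      f0).length = 26 ∧
    ∀ m < 26,
      ((PySem.List.pyRange 0 (k : Int)).foldl
        (fun f i =>
          PySem.List.pySetD f ((((PySem.List.pyGet? cs i).getD ' ').toNat : Int) - 97) i)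
        f0).getD m 0 =
      if 0 ≤ pvLast (cs.take k) m then pvLast (cs.take k) m else f0.getD m 0 := by
  intro k
  induction k with
  | zero =>
    intro _ f0 hf0
    rw [show ((0 : Nat) : Int) = 0 by norm_num, PySem.List.pyRange_one_eq_nil (by omega)]
    simp only [List.foldl_nil]
    refine ⟨hf0, fun m hm => ?_⟩
    rw [if_neg (by rw [pvLast_neg.mpr (by simp [pvOcc])]; omega)]
  | succ k ih =>
    intro hk f0 hf0
    have hkn : k < cs.length := by omega
    rw [show ((k + 1 : Nat) : Int) = (k : Int) + 1 by push_cast; ring,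
      PySem.List.pyRange_one_succ_right (by omega), List.foldl_append, List.foldl_cons,
      List.foldl_nil]
    obtain ⟨hl, hent⟩ := ih (by omega) f0 hf0
    have hchar := h _ (pvAt_mem cs (k : Int) (by omega) (by exact_mod_cast hkn))
    rw [pvAt_get cs (k : Int) (by omega), pvSetD_cell _ _ _ hl hchar.1 hchar.2]
    have hATcell : pvAt cs (k : Int) = cs.getD k ' ' := by simp [pvAt]
    rw [hATcell]
    set ch := cs.getD k ' ' with hch
    have hchg : ch = cs[k] := by
      rw [hch, List.getD_eq_getElem?_getD, List.getElem?_eq_getElem hkn]; rfl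
    have htake : cs.take (k + 1) = cs.take k ++ [ch] := by
      rw [List.take_add_one, List.getElem?_eq_getElem hkn, hchg]; rfl
    have hlt : (cs.take k).length = k := by simp [List.length_take]; omega
    refine ⟨by simp [hl], fun m hm => ?_⟩
    have hsetD : ∀ res : List Int, res.length = 26 → ∀ v : Int,
        (res.set (pvCell ch) v).getD m 0 = if m = pvCell ch then v else res.getD m 0 := by
      intro res hres v
      rw [List.getD_eq_getElem?_getD, List.getElem?_set, List.getD_eq_getElem?_getD]
      by_cases hmm : pvCell ch = m
      · simp [hmm, hres, show m < 26 from hm]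
      · simp [hmm]
        exact fun hx => absurd hx.symm hmm
    rw [hsetD _ hl, htake, pvLast_snoc, hlt]
    by_cases hmc : pvCell ch = m
    · rw [if_pos hmc, if_pos hmc.symm, if_pos (show (0:Int) ≤ (k:Int) by omega)]
    · rw [if_neg hmc, if_neg (fun hx => hmc hx.symm), hent m hm]

theorem pvB_last_eq (cs : List Char) (h : ∀ c ∈ cs, 71 ≤ c.toNat ∧ c.toNat ≤ 122) :
    pvB_last cs = (List.range 26).map (fun m => pvLast cs m) := by
  unfold pvB_last
  rw [pvRepeat26]
  obtain ⟨hl, hent⟩ := pvB_last_go cs h cs.length (le_refl _) (List.replicate 26 (-1)) (by simp)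
  apply List.ext_getElem
  · rw [hl]; simp
  · intro i h1 h2
    have hi : i < 26 := by rw [hl] at h1; exact h1
    have e1 := hent i hi
    rw [List.getD_eq_getElem?_getD, List.getElem?_eq_getElem h1] at e1
    simp only [Option.getD_some] at e1
    rw [e1]
    simp only [List.getElem_map, List.getElem_range, List.take_length]
    have hrepl : (List.replicate 26 (-1:Int)).getD i 0 = -1 := by
      rw [List.getD_eq_getElem?_getD, List.getElem?_replicate]
      simp [hi]
    split_ifs with hc
    · rfl
    · rw [hrepl]
      by_cases hocc : pvOcc cs i = []
      · rw [pvLast_neg.mpr hocc]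
      · exact absurd (pvLast_nonneg_iff.mpr hocc) hc

def pvClosureOf (cs : List Char) (m : Nat) (p : Int × Int) : Prop :=
  p.1 ≤ pvFirst cs m ∧ pvLast cs m ≤ p.2 ∧ pvClosed cs p.1 p.2 ∧
    ∀ l' r', l' ≤ pvFirst cs m → pvLast cs m ≤ r' → pvClosed cs l' r' → l' ≤ p.1 ∧ p.2 ≤ r'

theorem pvExtendB_spec (cs : List Char) (h : ∀ c ∈ cs, 71 ≤ c.toNat ∧ c.toNat ≤ 122)
    (m : Nat) (hm : pvOcc cs m ≠ []) :
    ∀ (fuel : Nat) (l r : Int),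
    (0 ≤ l ∧ l ≤ r ∧ r < cs.length) →
    (l ≤ pvFirst cs m ∧ pvLast cs m ≤ r) →
    (∀ l' r', l' ≤ pvFirst cs m → pvLast cs m ≤ r' → pvClosed cs l' r' → l' ≤ l ∧ r ≤ r') →
    (cs.length + 1 - (r - l).toNat ≤ fuel) →
    pvClosureOf cs m (pvExtendB cs ((List.range 26).map (fun m => pvFirst cs m))
      ((List.range 26).map (fun m => pvLast cs m)) fuel l r) := by
  intro fuel
  induction fuel with
  | zero =>
    intro l r ha _ _ hfuel
    omega
  | succ fuel ih =>
    intro l r ha hb he hfuel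
    rw [pvExtendB]
    -- rewrite the two mapped lists
    have hwin : ∀ j ∈ PySem.List.pyRange l (r + 1), l ≤ j ∧ j ≤ r := by
      intro j hj
      have := PySem.List.mem_pyRange_one.mp hj
      omega
    have hmapF : (PySem.List.pyRange l (r + 1)).map (fun j =>
        PySem.List.pyGetD ((List.range 26).map (fun m => pvFirst cs m))
          ((((PySem.List.pyGet? cs j).getD ' ').toNat : Int) - 97) (-1)) =
        (PySem.List.pyRange l (r + 1)).map (fun j => pvFirst cs (pvCell (pvAt cs j))) := by
      apply List.map_congr_left
      intro j hj
      obtain ⟨hj1, hj2⟩ := hwin j hj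
      have hchar := h _ (pvAt_mem cs j (by omega) (by omega))
      rw [pvAt_get cs j (by omega), pvGetD_cell _ _ _ (by simp) hchar.1 hchar.2,
        pvMapRange_getD _ _ (pvCell_lt _)]
    have hmapL : (PySem.List.pyRange l (r + 1)).map (fun j =>
        PySem.List.pyGetD ((List.range 26).map (fun m => pvLast cs m))
          ((((PySem.List.pyGet? cs j).getD ' ').toNat : Int) - 97) (-1)) =
        (PySem.List.pyRange l (r + 1)).map (fun j => pvLast cs (pvCell (pvAt cs j))) := by
      apply List.map_congr_left
      intro j hj
      obtain ⟨hj1, hj2⟩ := hwin j hj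
      have hchar := h _ (pvAt_mem cs j (by omega) (by omega))
      rw [pvAt_get cs j (by omega), pvGetD_cell _ _ _ (by simp) hchar.1 hchar.2,
        pvMapRange_getD _ _ (pvCell_lt _)]
    rw [hmapF, hmapL]
    have hlmem : l ∈ PySem.List.pyRange l (r + 1) := PySem.List.mem_pyRange_one.mpr ⟨le_refl _, by omega⟩
    have hrmem : r ∈ PySem.List.pyRange l (r + 1) := PySem.List.mem_pyRange_one.mpr ⟨by omega, by omega⟩
    -- the min exists
    obtain ⟨nl, hnl⟩ : ∃ v, PySem.List.min?
        ((PySem.List.pyRange l (r + 1)).map (fun j => pvFirst cs (pvCell (pvAt cs j))))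
        (fun x => x) = some v := by
      cases hcase : PySem.List.min?
        ((PySem.List.pyRange l (r + 1)).map (fun j => pvFirst cs (pvCell (pvAt cs j))))
        (fun x => x) with
      | none =>
        rw [PySem.List.min?_eq_none_iff, List.map_eq_nil_iff] at hcase
        rw [hcase] at hlmem
        simp at hlmem
      | some v => exact ⟨v, rfl⟩
    obtain ⟨nr, hnr⟩ : ∃ v, PySem.List.max?
        ((PySem.List.pyRange l (r + 1)).map (fun j => pvLast cs (pvCell (pvAt cs j))))
        (fun x => x) = some v := by
      cases hcase : PySem.List.max?
        ((PySem.List.pyRange l (r + 1)).map (fun j => pvLast cs (pvCell (pvAt cs j))))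
        (fun x => x) with
      | none =>
        rw [PySem.List.max?_eq_none_iff, List.map_eq_nil_iff] at hcase
        rw [hcase] at hlmem
        simp at hlmem
      | some v => exact ⟨v, rfl⟩
    rw [hnl, hnr]
    simp only [Option.getD_some]
    -- min properties
    have hnl_min : ∀ j : Int, l ≤ j → j ≤ r → nl ≤ pvFirst cs (pvCell (pvAt cs j)) := by
      intro j hj1 hj2
      exact PySem.List.min?_isMin hnl _ (List.mem_map_of_mem
        (PySem.List.mem_pyRange_one.mpr ⟨hj1, by omega⟩))
    have hnr_max : ∀ j : Int, l ≤ j → j ≤ r → pvLast cs (pvCell (pvAt cs j)) ≤ nr := by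
      intro j hj1 hj2
      exact PySem.List.max?_isMax hnr _ (List.mem_map_of_mem
        (PySem.List.mem_pyRange_one.mpr ⟨hj1, by omega⟩))
    obtain ⟨j0, hj0mem, hj0⟩ := List.exists_of_mem_map (PySem.List.min?_mem hnl)
    obtain ⟨j1, hj1mem, hj1⟩ := List.exists_of_mem_map (PySem.List.max?_mem hnr)
    obtain ⟨hj01, hj02⟩ := hwin j0 hj0mem
    obtain ⟨hj11, hj12⟩ := hwin j1 hj1mem
    have hocc0 := pvAt_between cs j0 (by omega) (by omega)
    have hocc1 := pvAt_between cs j1 (by omega) (by omega)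
    have hnl_le : nl ≤ l := by
      have h1 := hnl_min l (le_refl _) (by omega)
      have h2 := (pvAt_between cs l (by omega) (by omega)).1
      omega
    have hnr_ge : r ≤ nr := by
      have := hnr_max r (by omega) (le_refl _)
      have h2 := (pvAt_between cs r (by omega) (by omega)).2.1
      omega
    have hnl_nonneg : 0 ≤ nl := by
      rw [← hj0]
      exact pvFirst_nonneg hocc0.2.2
    have hnr_lt : nr < cs.length := by
      rw [← hj1]
      exact pvLast_lt hocc1.2.2
    have hnew_min : ∀ l' r', l' ≤ pvFirst cs m → pvLast cs m ≤ r' → pvClosed cs l' r' →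
        l' ≤ nl ∧ nr ≤ r' := by
      intro l' r' hl' hr' hcl
      obtain ⟨hll, hrr⟩ := he l' r' hl' hr' hcl
      constructor
      · rw [← hj0]; exact (hcl j0 (by omega) (by omega)).1
      · rw [← hj1]; exact (hcl j1 (by omega) (by omega)).2
    by_cases hfix : nl = l ∧ nr = r
    · rw [if_pos hfix]
      refine ⟨hb.1, hb.2, ?_, he⟩
      intro j hj1' hj2'
      refine ⟨by rw [← hfix.1]; exact hnl_min j hj1' hj2', by rw [← hfix.2]; exact hnr_max j hj1' hj2'⟩
    · rw [if_neg hfix]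
      apply ih
      · refine ⟨hnl_nonneg, by omega, hnr_lt⟩
      · constructor
        · exact le_trans hnl_le hb.1
        · exact le_trans hb.2 hnr_ge
      · exact hnew_min
      · have hgrow : (r - l) + 1 ≤ nr - nl := by
          rcases (not_and_or.mp hfix) with hx | hx
          · have : nl < l := lt_of_le_of_ne hnl_le hx
            omega
          · have : r < nr := lt_of_le_of_ne hnr_ge (fun hh => hx hh.symm)
            omega
        omega

theorem pvClosureOf_unique {cs : List Char} {m : Nat} {p q : Int × Int}
    (hp : pvClosureOf cs m p) (hq : pvClosureOf cs m q) : p = q := by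
  obtain ⟨hp1, hp2, hp3, hp4⟩ := hp
  obtain ⟨hq1, hq2, hq3, hq4⟩ := hq
  obtain ⟨a, b⟩ := hp4 q.1 q.2 hq1 hq2 hq3
  obtain ⟨c, d⟩ := hq4 p.1 p.2 hp1 hp2 hp3
  exact Prod.ext (le_antisymm c a) (le_antisymm b d)

def pvClo (cs : List Char) (m : Nat) : Int × Int :=
  pvExtendB cs ((List.range 26).map (fun m => pvFirst cs m))
    ((List.range 26).map (fun m => pvLast cs m)) (cs.length + 2) (pvFirst cs m) (pvLast cs m)

theorem pvClo_spec (cs : List Char) (h : ∀ c ∈ cs, 71 ≤ c.toNat ∧ c.toNat ≤ 122)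
    (m : Nat) (hm : pvOcc cs m ≠ []) : pvClosureOf cs m (pvClo cs m) := by
  apply pvExtendB_spec cs h m hm
  · exact ⟨pvFirst_nonneg hm, pvFirst_le_pvLast hm, pvLast_lt hm⟩
  · exact ⟨le_refl _, le_refl _⟩
  · intro l' r' h1 h2 _
    exact ⟨h1, h2⟩
  · omega

-- bounds of a closure interval

theorem pvClosureOf_bounds {cs : List Char} {m : Nat} {p : Int × Int}
    (hm : pvOcc cs m ≠ []) (hp : pvClosureOf cs m p) :
    0 ≤ p.1 ∧ p.1 ≤ p.2 ∧ p.2 < cs.length := by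
  obtain ⟨h1, h2, h3, h4⟩ := hp
  obtain ⟨a, b⟩ := h4 0 ((cs.length : Int) - 1) (pvFirst_nonneg hm)
    (by have := pvLast_lt hm; omega) (pvClosed_all cs)
  have := pvFirst_le_pvLast hm
  refine ⟨by omega, by omega, by omega⟩

def pvEntryOK (cs : List Char) (m : Nat) (p : Int × Int) : Prop :=
  0 ≤ p.1 ∧ p.2 < cs.length ∧ p.1 ≤ pvFirst cs m ∧ pvLast cs m ≤ p.2 ∧
    (∀ l' r', l' ≤ pvFirst cs m → pvLast cs m ≤ r' → pvClosed cs l' r' → l' ≤ p.1 ∧ p.2 ≤ r') ∧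
    p.1 ≤ pvFirst cs (pvCell (pvAt cs p.1)) ∧ pvLast cs (pvCell (pvAt cs p.1)) ≤ p.2

theorem pvEntryOK_rng (cs : List Char) (m : Nat) (hm : pvOcc cs m ≠ []) :
    pvEntryOK cs m (pvFirst cs m, pvLast cs m) := by
  have hat : pvCell (pvAt cs (pvFirst cs m)) = m := pvAt_first hm
  refine ⟨pvFirst_nonneg hm, pvLast_lt hm, le_refl _, le_refl _, ?_, ?_, ?_⟩
  · intro l' r' h1 h2 _; exact ⟨h1, h2⟩
  · simp only [hat]; exact le_refl _
  · simp only [hat]; exact le_refl _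

theorem pvEntryOK_of_closure (cs : List Char) (m : Nat) (hm : pvOcc cs m ≠ [])
    (p : Int × Int) (hp : pvClosureOf cs m p) : pvEntryOK cs m p := by
  obtain ⟨hb1, hb2, hb3⟩ := pvClosureOf_bounds hm hp
  obtain ⟨h1, h2, h3, h4⟩ := hp
  have hl := h3 p.1 (le_refl _) (by omega)
  exact ⟨hb1, hb3, h1, h2, h4, hl.1, hl.2⟩

-- getD independent of default when index in range


theorem pvGetD_set_self {α : Type} {ps : List α} {m : Nat} (hm : m < ps.length) (v d : α) :
    (ps.set m v).getD m d = v := by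
  rw [List.getD_eq_getElem?_getD, List.getElem?_set_self (by omega)]
  rfl

theorem pvGetD_set_ne {α : Type} {ps : List α} {m k : Nat} (hne : m ≠ k) (v d : α) :
    (ps.set m v).getD k d = ps.getD k d := by
  rw [List.getD_eq_getElem?_getD, List.getElem?_set_ne hne, ← List.getD_eq_getElem?_getD]

theorem pvSet_set {α : Type} (ps : List α) (m : Nat) (v w : α) :
    (ps.set m v).set m w = ps.set m w := by
  simp [List.set_set]

theorem pvLoopA_spec (cs : List Char) (hpre : ∀ c ∈ cs, 71 ≤ c.toNat ∧ c.toNat ≤ 122)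
    (m0 : Nat) (hm0 : m0 < 26) (hocc : pvOcc cs m0 ≠ []) :
    ∀ (fuel : Nat) (ps : List (Int × Int)) (l r j : Int),
    ps.length = 26 →
    ps.getD m0 ((-1 : Int), (-1 : Int)) = (l, r) →
    (∀ mc < 26, mc ≠ m0 → pvOcc cs mc ≠ [] →
      pvEntryOK cs mc (ps.getD mc ((-1 : Int), (-1 : Int)))) →
    (0 ≤ l ∧ l ≤ r ∧ r < cs.length) →
    (l ≤ pvFirst cs m0 ∧ pvLast cs m0 ≤ r) →
    (∀ k : Int, l ≤ k → k < j →
      l ≤ pvFirst cs (pvCell (pvAt cs k)) ∧ pvLast cs (pvCell (pvAt cs k)) ≤ r) →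
    (l ≤ j ∧ j ≤ r + 1) →
    (∀ l' r', l' ≤ pvFirst cs m0 → pvLast cs m0 ≤ r' → pvClosed cs l' r' → l' ≤ l ∧ r ≤ r') →
    ((cs.length - (r - l).toNat) * (cs.length + 2) + (r + 1 - j).toNat + 1 ≤ fuel) →
    ∃ p, pvLoopA cs fuel ps (m0 : Int) j = ps.set m0 p ∧ pvClosureOf cs m0 p := by
  intro fuel
  induction fuel with
  | zero =>
    intro ps l r j _ _ _ _ _ _ _ _ hfuel
    omega
  | succ fuel ih =>
    intro ps l r j hlen hm0e hOK ha hb hscan hd he hfuel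
    rw [pvLoopA]
    rw [show ((m0 : Int)) = ((m0 : Nat) : Int) from rfl, PySem.List.pyGetD_natCast, hm0e]
    by_cases hj : j ≤ r
    · rw [if_pos (by exact hj)]
      dsimp only
      have hj0 : (0 : Int) ≤ j := by omega
      have hjn : j < cs.length := by omega
      have hchar := hpre _ (pvAt_mem cs j hj0 (by omega))
      rw [pvAt_get cs j hj0, pvGetD_cell _ _ _ hlen hchar.1 hchar.2]
      set mc := pvCell (pvAt cs j) with hmc
      have hmclt : mc < 26 := pvCell_lt _
      have hbet := pvAt_between cs j hj0 (by omega)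
      by_cases hccase : mc = m0
      · -- reading the currently processed letter: its entry is (l, r), test passes
        rw [hccase, hm0e, if_pos ⟨le_refl _, le_refl _⟩]
        have hscan' : ∀ k : Int, l ≤ k → k < j + 1 →
            l ≤ pvFirst cs (pvCell (pvAt cs k)) ∧ pvLast cs (pvCell (pvAt cs k)) ≤ r := by
          intro k hk1 hk2
          by_cases hkj : k = j
          · subst hkj
            rw [← hmc, hccase]
            exact ⟨hb.1, hb.2⟩
          · exact hscan k hk1 (by omega)
        exact ih ps l r (j + 1) hlen hm0e hOK ha hb hscan' (by omega) he (by omega)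
      · have hmcocc : pvOcc cs mc ≠ [] := hbet.2.2
        have hE := hOK mc hmclt hccase hmcocc
        set q := ps.getD mc ((-1 : Int), (-1 : Int)) with hq
        obtain ⟨hE1, hE2, hE3, hE4, hE5, hE6, hE7⟩ := hE
        by_cases hcont : l ≤ q.1 ∧ q.2 ≤ r
        · rw [if_pos hcont]
          have hscan' : ∀ k : Int, l ≤ k → k < j + 1 →
              l ≤ pvFirst cs (pvCell (pvAt cs k)) ∧ pvLast cs (pvCell (pvAt cs k)) ≤ r := by
            intro k hk1 hk2
            by_cases hkj : k = j
            · subst hkj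
              rw [← hmc]
              exact ⟨le_trans hcont.1 hE3, le_trans hE4 hcont.2⟩
            · exact hscan k hk1 (by omega)
          exact ih ps l r (j + 1) hlen hm0e hOK ha hb hscan' (by omega) he (by omega)
        · rw [if_neg hcont]
          rw [show ((m0 : Int)) = ((m0 : Nat) : Int) from rfl, PySem.List.pySetD_natCast]
          set l' := min l q.1 with hl'
          set r' := max r q.2 with hr'
          -- every closed superset of m0's range contains q
          have hqsub : ∀ lC rC, lC ≤ pvFirst cs m0 → pvLast cs m0 ≤ rC → pvClosed cs lC rC →
              lC ≤ q.1 ∧ q.2 ≤ rC := by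
            intro lC rC h1 h2 h3
            obtain ⟨hll, hrr⟩ := he lC rC h1 h2 h3
            have hjC := h3 j (by omega) (by omega)
            rw [← hmc] at hjC
            exact hE5 lC rC hjC.1 hjC.2 h3
          have hscan' : ∀ k : Int, l' ≤ k → k < l' + 1 →
              l' ≤ pvFirst cs (pvCell (pvAt cs k)) ∧ pvLast cs (pvCell (pvAt cs k)) ≤ r' := by
            intro k hk1 hk2
            have hkl : k = l' := by omega
            subst hkl
            by_cases hmin : q.1 ≤ l
            · have : l' = q.1 := by omega
              rw [this]
              exact ⟨le_trans (by omega) hE6, le_trans hE7 (by omega)⟩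
            · have hleq : l' = l := by omega
              rw [hleq]
              by_cases hjl : j = l
              · have : pvCell (pvAt cs l) = mc := by rw [← hjl]
                rw [this]
                exact ⟨le_trans (by omega) hE3, le_trans hE4 (by omega)⟩
              · have := hscan l (le_refl _) (by omega)
                exact ⟨by omega, by omega⟩
          have hset_m0 : (ps.set m0 (l', r')).getD m0 ((-1 : Int), (-1 : Int)) = (l', r') :=
            pvGetD_set_self (by omega) _ _
          have hset_ne : ∀ mcx < 26, mcx ≠ m0 → pvOcc cs mcx ≠ [] →
              pvEntryOK cs mcx ((ps.set m0 (l', r')).getD mcx ((-1 : Int), (-1 : Int))) := by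
            intro mcx h1 h2 h3
            rw [pvGetD_set_ne (fun hx => h2 hx.symm)]
            exact hOK mcx h1 h2 h3
          have hgrow : (r - l).toNat + 1 ≤ (r' - l').toNat := by
            rcases (not_and_or.mp hcont) with hx | hx
            · have hx' : q.1 < l := by omega
              have : l' = q.1 := by omega
              omega
            · have hx' : r < q.2 := by omega
              omega
          have hwid : (r' - l').toNat ≤ cs.length := by
            have : 0 ≤ l' := by omega
            have : r' < cs.length := by omega
            omega
          have hfuel' : (cs.length - (r' - l').toNat) * (cs.length + 2) +
              (r' + 1 - (l' + 1)).toNat + 1 ≤ fuel := by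
            have hkey : (cs.length - (r' - l').toNat) * (cs.length + 2) + (cs.length + 2) ≤
                (cs.length - (r - l).toNat) * (cs.length + 2) := by
              have hstep : (cs.length - (r' - l').toNat) + 1 ≤ cs.length - (r - l).toNat := by
                omega
              calc (cs.length - (r' - l').toNat) * (cs.length + 2) + (cs.length + 2)
                  = ((cs.length - (r' - l').toNat) + 1) * (cs.length + 2) := by ring
                _ ≤ (cs.length - (r - l).toNat) * (cs.length + 2) :=
                    Nat.mul_le_mul_right _ hstep
            omega
          obtain ⟨p, hp1, hp2⟩ := ih (ps.set m0 (l', r')) l' r' (l' + 1) (by simp [hlen])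
            hset_m0 hset_ne ⟨by omega, by omega, by omega⟩
            ⟨le_trans (by omega) hb.1, le_trans hb.2 (by omega)⟩ hscan' (by omega)
            (fun lC rC h1 h2 h3 => by
              obtain ⟨a1, a2⟩ := he lC rC h1 h2 h3
              obtain ⟨b1, b2⟩ := hqsub lC rC h1 h2 h3
              exact ⟨by omega, by omega⟩)
            hfuel'
          refine ⟨p, ?_, hp2⟩
          rw [hp1, pvSet_set]
    · rw [if_neg hj]
      have hjr : j = r + 1 := by omega
      refine ⟨(l, r), ?_, ?_, ?_, ?_, he⟩
      · have : ps.getD m0 ((-1 : Int), (-1 : Int)) = ps[m0]'(by omega) := by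
          rw [List.getD_eq_getElem?_getD, List.getElem?_eq_getElem (by omega : m0 < ps.length)]
          rfl
        rw [this] at hm0e
        rw [← hm0e, List.set_getElem_self]
      · exact hb.1
      · exact hb.2
      · intro k hk1 hk2
        exact hscan k hk1 (by omega)

def pvG (cs : List Char) (K : Nat) (m : Nat) : Int × Int :=
  if pvOcc cs m = [] then ((-1 : Int), (-1 : Int))
  else if m < K then pvClo cs m else (pvFirst cs m, pvLast cs m)

theorem pvA_phase2_go (cs : List Char) (h : ∀ c ∈ cs, 71 ≤ c.toNat ∧ c.toNat ≤ 122) :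
    ∀ (K : Nat), K ≤ 26 →
    (PySem.List.pyRange 0 (K : Int)).foldl
      (fun ps idx1 =>
        if PySem.List.pyGetD ps idx1 ((-1 : Int), (-1 : Int)) ≠ ((-1 : Int), (-1 : Int)) then
          pvLoopA cs ((cs.length + 2) * (cs.length + 2)) ps idx1
            (PySem.List.pyGetD ps idx1 ((-1 : Int), (-1 : Int))).1
        else ps)
      ((List.range 26).map (fun m => (pvFirst cs m, pvLast cs m))) =
    (List.range 26).map (pvG cs K) := by
  intro K
  induction K with
  | zero =>
    intro _
    rw [show ((0 : Nat) : Int) = 0 from rfl, PySem.List.pyRange_one_eq_nil (by omega)]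
    simp only [List.foldl_nil]
    apply List.map_congr_left
    intro m hm
    unfold pvG
    by_cases hocc : pvOcc cs m = []
    · rw [if_pos hocc, pvFirst_neg.mpr hocc, pvLast_neg.mpr hocc]
    · rw [if_neg hocc, if_neg (by omega)]
  | succ K ih =>
    intro hK
    rw [show ((K + 1 : Nat) : Int) = (K : Int) + 1 by push_cast; ring,
      PySem.List.pyRange_one_succ_right (by omega), List.foldl_append, ih (by omega),
      List.foldl_cons, List.foldl_nil]
    have hK26 : K < 26 := by omega
    rw [show ((K : Int)) = ((K : Nat) : Int) from rfl, PySem.List.pyGetD_natCast,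
      pvMapRange_getD _ _ hK26]
    have hGK : pvG cs K K = if pvOcc cs K = [] then ((-1 : Int), (-1 : Int))
        else (pvFirst cs K, pvLast cs K) := by
      unfold pvG
      split_ifs with h1 h2
      · rfl
      · omega
      · rfl
    by_cases hocc : pvOcc cs K = []
    · rw [hGK, if_pos hocc, if_neg (by simp)]
      apply List.map_congr_left
      intro m hm
      unfold pvG
      by_cases ho : pvOcc cs m = []
      · rw [if_pos ho, if_pos ho]
      · rw [if_neg ho, if_neg ho]
        by_cases hmK : m < K
        · rw [if_pos hmK, if_pos (by omega)]
        · have hne : m ≠ K := by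
            intro hx; rw [hx] at ho; exact ho hocc
          rw [if_neg hmK, if_neg (by omega)]
    · have hfl : (0 : Int) ≤ pvFirst cs K := pvFirst_nonneg hocc
      rw [hGK, if_neg hocc, if_pos (by intro hx; rw [Prod.ext_iff] at hx; simp at hx; omega)]
      have hlast : pvLast cs K < cs.length := pvLast_lt hocc
      have hfle : pvFirst cs K ≤ pvLast cs K := pvFirst_le_pvLast hocc
      obtain ⟨p, hp1, hp2⟩ := pvLoopA_spec cs h K hK26 hocc ((cs.length + 2) * (cs.length + 2))
        ((List.range 26).map (pvG cs K)) (pvFirst cs K) (pvLast cs K) (pvFirst cs K)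
        (by simp)
        (by rw [pvMapRange_getD _ _ hK26, hGK, if_neg hocc])
        (by
          intro mc hmc hne hoccmc
          rw [pvMapRange_getD _ _ hmc]
          unfold pvG
          rw [if_neg hoccmc]
          by_cases hmcK : mc < K
          · rw [if_pos hmcK]
            exact pvEntryOK_of_closure cs mc hoccmc _ (pvClo_spec cs h mc hoccmc)
          · rw [if_neg hmcK]
            exact pvEntryOK_rng cs mc hoccmc)
        ⟨hfl, hfle, hlast⟩ ⟨le_refl _, le_refl _⟩
        (by intro k h1 h2; omega) ⟨le_refl _, by omega⟩
        (by intro l' r' h1 h2 _; exact ⟨h1, h2⟩)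
        (by
          set n := cs.length
          set w := (pvLast cs K - pvFirst cs K).toNat
          have hb1 : (n - w) * (n + 2) ≤ n * (n + 2) := Nat.mul_le_mul_right _ (by omega)
          have hb2 : (n + 2) * (n + 2) = n * (n + 2) + 2 * (n + 2) := by ring
          have hb3 : (pvLast cs K + 1 - pvFirst cs K).toNat ≤ n := by omega
          omega)
      rw [hp1, pvMapRange_set _ _ hK26]
      have hpc : p = pvClo cs K := pvClosureOf_unique hp2 (pvClo_spec cs h K hocc)
      apply List.map_congr_left
      intro m hm
      unfold pvG
      by_cases hmK : m = K
      · subst hmK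
        rw [if_pos rfl, if_neg hocc, if_pos (by omega), hpc]
      · rw [if_neg hmK]
        by_cases ho : pvOcc cs m = []
        · rw [if_pos ho, if_pos ho]
        · rw [if_neg ho, if_neg ho]
          by_cases hm2 : m < K
          · rw [if_pos hm2, if_pos (by omega)]
          · rw [if_neg hm2, if_neg (by omega)]

theorem pvA_phase2_eq (cs : List Char) (h : ∀ c ∈ cs, 71 ≤ c.toNat ∧ c.toNat ≤ 122) :
    pvA_phase2 cs (pvA_phase1 cs) =
      (List.range 26).map
        (fun m => if pvOcc cs m ≠ [] then pvClo cs m else ((-1 : Int), (-1 : Int))) := by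
  unfold pvA_phase2
  rw [pvA_phase1_eq cs h,
    show (26 : Int) = ((26 : Nat) : Int) by norm_num]
  rw [pvA_phase2_go cs h 26 (le_refl _)]
  apply List.map_congr_left
  intro m hm
  have hm26 : m < 26 := by simpa using hm
  unfold pvG
  by_cases ho : pvOcc cs m = []
  · rw [if_pos ho, if_neg (by simpa using ho)]
  · rw [if_neg ho, if_pos hm26, if_pos (show pvOcc cs m ≠ [] from ho)]

theorem pvClo_bounds (cs : List Char) (h : ∀ c ∈ cs, 71 ≤ c.toNat ∧ c.toNat ≤ 122)
    (m : Nat) (hm : pvOcc cs m ≠ []) :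
    0 ≤ (pvClo cs m).1 ∧ (pvClo cs m).1 ≤ (pvClo cs m).2 ∧ (pvClo cs m).2 < cs.length :=
  pvClosureOf_bounds hm (pvClo_spec cs h m hm)

theorem pvCandidates_eq (cs : List Char) (h : ∀ c ∈ cs, 71 ≤ c.toNat ∧ c.toNat ≤ 122) :
    ((List.range 26).map
        (fun m => if pvOcc cs m ≠ [] then pvClo cs m else ((-1 : Int), (-1 : Int)))).filter
      (fun p => p ≠ ((-1 : Int), (-1 : Int))) =
    ((List.range 26).filter (fun m => pvOcc cs m ≠ [])).map (pvClo cs) := by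
  rw [List.filter_map]
  rw [List.filter_congr (q := fun m => decide (pvOcc cs m ≠ [])) ?_]
  · apply List.map_congr_left
    intro m hm
    have ho : pvOcc cs m ≠ [] := by simpa using (List.mem_filter.mp hm).2
    simp [ho]
  · intro m hm
    simp only [Function.comp_apply]
    by_cases ho : pvOcc cs m = []
    · simp [ho]
    · have hb := (pvClo_bounds cs h m ho).1
      have : pvClo cs m ≠ ((-1 : Int), (-1 : Int)) := by
        intro hx
        rw [hx] at hb
        simp at hb
      simp [ho, this]

theorem pvB_intervals_eq (cs : List Char) (h : ∀ c ∈ cs, 71 ≤ c.toNat ∧ c.toNat ≤ 122) :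
    pvB_intervals cs (pvB_first cs) (pvB_last cs) =
      PySem.Set.ofList (((List.range 26).filter (fun m => pvOcc cs m ≠ [])).map (pvClo cs)) := by
  unfold pvB_intervals
  rw [pvB_first_eq cs h, pvB_last_eq cs h,
    show (26 : Int) = ((26 : Nat) : Int) by norm_num, PySem.List.pyRange_zero_natCast,
    List.foldl_map]
  refine Eq.trans (PySem.List.foldl_congr_mem _ _
    (fun (acc : List (Int × Int)) (m : Nat) =>
      if pvOcc cs m ≠ [] then PySem.Set.add acc (pvClo cs m) else acc) _ ?_) ?_
  · intro acc m hm
    have hm26 : m < 26 := by simpa using hm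
    dsimp only
    rw [PySem.List.pyGetD_natCast, PySem.List.pyGetD_natCast,
      pvMapRange_getD _ _ hm26, pvMapRange_getD _ _ hm26]
    by_cases ho : pvOcc cs m = []
    · rw [if_pos (pvFirst_neg.mpr ho), if_neg (by simpa using ho)]
    · rw [if_neg (fun hx => ho (pvFirst_neg.mp hx)), if_pos (show pvOcc cs m ≠ [] from ho),
        PySem.Set.add_eq_ite]
      rfl
  · rw [PySem.List.foldl_ite_eq_foldl_filter, PySem.Set.ofList_eq_foldl, List.foldl_map]

theorem pvGreedy_eq (cs : List Char) :
    ∀ (L : List (Int × Int)), (∀ p ∈ L, 0 ≤ p.1 ∧ p.1 ≤ p.2) →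
    ∀ (acc : List String) (e : Int), (e = -1 ∨ 0 ≤ e) →
    (L.foldl
      (fun (st : List String × Int) p =>
        if st.2 = -1 ∨ st.2 < p.1 then
          (st.1 ++ [String.ofList (PySem.List.slice cs (some p.1) (some (p.2 + 1)))], p.2)
        else st) (acc, e)) =
    (L.foldl
      (fun (st : List String × Int) p =>
        if st.2 < p.1 then
          (st.1 ++ [String.ofList (PySem.List.slice cs (some p.1) (some (p.2 + 1)))], p.2)
        else st) (acc, e)) := by
  intro L
  induction L with
  | nil => intro _ _ _ _; rfl
  | cons p t ih =>
    intro hL acc e he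
    have hp := hL p (by simp)
    simp only [List.foldl_cons]
    have ht : ∀ q ∈ t, 0 ≤ q.1 ∧ q.1 ≤ q.2 := fun q hq => hL q (by simp [hq])
    by_cases hcond : e < p.1
    · rw [if_pos (Or.inr hcond), if_pos hcond]
      exact ih ht _ p.2 (Or.inr (by omega))
    · by_cases he1 : e = -1
      · exact absurd (by omega : e < p.1) hcond
      · rw [if_neg (by rintro (h1 | h2); exact he1 h1; exact hcond h2), if_neg hcond]
        exact ih ht acc e he

theorem pv_main (s : String) (hpre : ∀ c ∈ s.toList, 71 ≤ c.toNat ∧ c.toNat ≤ 122) :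
    maxNumOfSubstrings s = maxNumOfSubstrings_alt s := by
  unfold maxNumOfSubstrings maxNumOfSubstrings_alt
  dsimp only
  set cs := s.toList with hcs
  rw [pvA_phase2_eq cs hpre, pvCandidates_eq cs hpre, pvB_intervals_eq cs hpre]
  set L := PySem.List.sorted2
    (PySem.Set.ofList (((List.range 26).filter (fun m => pvOcc cs m ≠ [])).map (pvClo cs)))
    (fun p : Int × Int => p.2) (fun p : Int × Int => p.1) with hL
  have hmem : ∀ p ∈ L, 0 ≤ p.1 ∧ p.1 ≤ p.2 := by
    intro p hp
    have hp1 : p ∈ PySem.Set.ofList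
        (((List.range 26).filter (fun m => pvOcc cs m ≠ [])).map (pvClo cs)) :=
      (PySem.List.sorted2_perm _ _ _ _).mem_iff.mp hp
    have hp2 := (PySem.Set.mem_ofList _ _).mp hp1
    obtain ⟨m, hm, rfl⟩ := List.mem_map.mp hp2
    have ho : pvOcc cs m ≠ [] := by simpa using (List.mem_filter.mp hm).2
    obtain ⟨a, b, c⟩ := pvClo_bounds cs hpre m ho
    exact ⟨a, b⟩
  rw [pvGreedy_eq cs L hmem [] (-1) (Or.inl rfl)]

-- ===== VERDICT (by name: the statement is the Claim_ definition above) =====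
theorem maxNumOfSubstrings_spec : Claim_equal_maxNumOfSubstrings := by
  intro s _hdom hpre
  exact pv_main s ((pvPre_iff s).mp hpre)
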